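-- pv_equiv track=rewrite | github.com/krikun98/montgomery | galois.py | mon_mult_and_square
-- ===== SOURCE A (Python) =====
-- def mon_mult_and_square(m, c, irp=int("100011011", 2)):
--     t = m
--     mul = 0
--     sqr = 0
--     for i in range(irp.bit_length() - 2, -1, -1):
--         if t & 1:
--             t = t ^ irp
--         t >>= 1
--         if c & (1 << i):
--             mul ^= t
--         if m & (1 << i):
--             sqr ^= t
--     return sqr, mul
-- ===== SOURCE B (Python) =====
-- def mon_mult_and_square(m, c, irp=int("100011011", 2)):
--     def go(t, i):
--         # (sqr, mul) contributions for bit positions i down to 0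
--         if i < 0:
--             return 0, 0
--         t = (t ^ irp) >> 1 if t & 1 else t >> 1
--         s, u = go(t, i - 1)
--         if m >> i & 1:
--             s ^= t
--         if c >> i & 1:
--             u ^= t
--         return s, u
--     return go(m, irp.bit_length() - 2)
-- ===== Notes on version B (the rewrite author's own statement) =====
-- stated objective: alternative
-- what changed: A's forward iterative loop over range(bit_length-2,-1,-1) with three fused accumulators and mask bit tests (x & (1 << i)) becomes a top-down recursion over the bit positions that XORs the (sqr, mul) contributions in on the way back out of the recursion, testing bits by shift-and-mask (x >> i & 1).
import Mathlib
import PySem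

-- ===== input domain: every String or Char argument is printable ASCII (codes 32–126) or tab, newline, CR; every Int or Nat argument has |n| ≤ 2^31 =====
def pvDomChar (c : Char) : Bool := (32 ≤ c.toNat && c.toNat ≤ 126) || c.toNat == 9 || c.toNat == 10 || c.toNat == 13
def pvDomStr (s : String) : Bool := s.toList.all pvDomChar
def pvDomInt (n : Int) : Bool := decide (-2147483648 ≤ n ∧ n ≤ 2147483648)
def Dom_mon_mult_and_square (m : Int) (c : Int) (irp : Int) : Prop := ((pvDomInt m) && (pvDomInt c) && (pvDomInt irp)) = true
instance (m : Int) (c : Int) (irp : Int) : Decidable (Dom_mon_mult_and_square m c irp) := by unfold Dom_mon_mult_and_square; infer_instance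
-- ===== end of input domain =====

-- B replaces A's iterative fused loop (forward foldl over a countdown range, mask test c & (1 << i))
-- by a top-down recursion over the bit positions that XORs contributions in on the way back out of
-- the recursion, testing bits by shift-and-mask (x >> i & 1); objective: alternative decomposition.

-- ===== PORT A =====
-- A's fused loop: state (t, mul, sqr), one forward pass over range(bit_length-2, -1, -1).
def mon_mult_and_square (m : Int) (c : Int) (irp : Int) : Int × Int :=
  let st := (PySem.List.pyRange ((PySem.Int.bitLength irp : Int) - 2) (-1) (-1)).foldl
    (fun (st : Int × Int × Int) (i : Int) =>
      let t0 := st.1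
      let t1 := if PySem.Int.band t0 1 ≠ 0 then PySem.Int.bxor t0 irp else t0
      let t := t1 >>> 1
      let mul := if PySem.Int.band c ((1 : Int) <<< i.toNat) ≠ 0 then PySem.Int.bxor st.2.1 t else st.2.1
      let sqr := if PySem.Int.band m ((1 : Int) <<< i.toNat) ≠ 0 then PySem.Int.bxor st.2.2 t else st.2.2
      (t, mul, sqr))
    (m, 0, 0)
  (st.2.2, st.2.1)

-- ===== PORT B =====
-- B's recursion go(t, i), transcribed with fuel k = i + 1 (Python's base case i < 0 is k = 0,
-- and the body at fuel k+1 handles bit position i = k); the recursive call happens first and the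
-- contributions are XORed in on the way back out, exactly as in Source B.
def pvGo (m : Int) (c : Int) (irp : Int) : Int → Nat → Int × Int
  | _, 0 => (0, 0)
  | t, Nat.succ k =>
    let t' := if PySem.Int.band t 1 ≠ 0 then (PySem.Int.bxor t irp) >>> 1 else t >>> 1
    let p := pvGo m c irp t' k
    (if PySem.Int.band (m >>> k) 1 ≠ 0 then PySem.Int.bxor p.1 t' else p.1,
     if PySem.Int.band (c >>> k) 1 ≠ 0 then PySem.Int.bxor p.2 t' else p.2)

def mon_mult_and_square_alt (m : Int) (c : Int) (irp : Int) : Int × Int :=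
  pvGo m c irp m (PySem.Int.bitLength irp - 1)

-- ===== PRECONDITION & SPEC =====
def Spec_mon_mult_and_square (m : Int) (c : Int) (irp : Int) (out : Int × Int) : Prop := out = mon_mult_and_square_alt m c irp
instance (m : Int) (c : Int) (irp : Int) (out : Int × Int) : Decidable (Spec_mon_mult_and_square m c irp out) := by unfold Spec_mon_mult_and_square; infer_instance

-- ===== CLAIM (what is proved, stated in full; the proofs are below) =====
def Claim_equal_mon_mult_and_square : Prop := ∀ (m : Int) (c : Int) (irp : Int), Dom_mon_mult_and_square m c irp → Spec_mon_mult_and_square m c irp (mon_mult_and_square m c irp)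

-- ===== LEMMAS AND PROOFS =====

-- Signed-magnitude encoding of Python's infinite two's complement: pvEnc false v = v, pvEnc true v = -v-1.
def pvEnc (s : Bool) (v : Nat) : Int := if s then -(v : Int) - 1 else (v : Int)

theorem pvEnc_ofNat (v : Nat) : (Int.ofNat v) = pvEnc false v := by simp [pvEnc]

theorem pvEnc_negSucc (v : Nat) : (Int.negSucc v) = pvEnc true v := by
  simp [pvEnc, Int.negSucc_eq]; ring

theorem pvBxor_enc (s t : Bool) (v w : Nat) :
    PySem.Int.bxor (pvEnc s v) (pvEnc t w) = pvEnc (xor s t) (v ^^^ w) := by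
  have hv : (0 : Int) ≤ (v : Int) := Int.natCast_nonneg v
  have hw : (0 : Int) ≤ (w : Int) := Int.natCast_nonneg w
  cases s <;> cases t <;>
    simp [pvEnc, PySem.Int.bxor, hv, hw] <;> omega

-- XOR order does not matter: the exact shape the loop-fusion proof needs.
theorem pvBxor_left_comm (a b c : Int) :
    PySem.Int.bxor (PySem.Int.bxor a b) c = PySem.Int.bxor a (PySem.Int.bxor c b) := by
  cases a with
  | ofNat va =>
    cases b with
    | ofNat vb =>
      cases c with
      | ofNat vc =>
        rw [pvEnc_ofNat va, pvEnc_ofNat vb, pvEnc_ofNat vc, pvBxor_enc, pvBxor_enc, pvBxor_enc, pvBxor_enc]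
        simp [Nat.xor_assoc, Nat.xor_comm vb vc]
      | negSucc vc =>
        rw [pvEnc_ofNat va, pvEnc_ofNat vb, pvEnc_negSucc vc, pvBxor_enc, pvBxor_enc, pvBxor_enc, pvBxor_enc]
        simp [Nat.xor_assoc, Nat.xor_comm vb vc]
    | negSucc vb =>
      cases c with
      | ofNat vc =>
        rw [pvEnc_ofNat va, pvEnc_negSucc vb, pvEnc_ofNat vc, pvBxor_enc, pvBxor_enc, pvBxor_enc, pvBxor_enc]
        simp [Nat.xor_assoc, Nat.xor_comm vb vc]
      | negSucc vc =>
        rw [pvEnc_ofNat va, pvEnc_negSucc vb, pvEnc_negSucc vc, pvBxor_enc, pvBxor_enc, pvBxor_enc, pvBxor_enc]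
        simp [Nat.xor_assoc, Nat.xor_comm vb vc]
  | negSucc va =>
    cases b with
    | ofNat vb =>
      cases c with
      | ofNat vc =>
        rw [pvEnc_negSucc va, pvEnc_ofNat vb, pvEnc_ofNat vc, pvBxor_enc, pvBxor_enc, pvBxor_enc, pvBxor_enc]
        simp [Nat.xor_assoc, Nat.xor_comm vb vc]
      | negSucc vc =>
        rw [pvEnc_negSucc va, pvEnc_ofNat vb, pvEnc_negSucc vc, pvBxor_enc, pvBxor_enc, pvBxor_enc, pvBxor_enc]
        simp [Nat.xor_assoc, Nat.xor_comm vb vc]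
    | negSucc vb =>
      cases c with
      | ofNat vc =>
        rw [pvEnc_negSucc va, pvEnc_negSucc vb, pvEnc_ofNat vc, pvBxor_enc, pvBxor_enc, pvBxor_enc, pvBxor_enc]
        simp [Nat.xor_assoc, Nat.xor_comm vb vc]
      | negSucc vc =>
        rw [pvEnc_negSucc va, pvEnc_negSucc vb, pvEnc_negSucc vc, pvBxor_enc, pvBxor_enc, pvBxor_enc, pvBxor_enc]
        simp [Nat.xor_assoc, Nat.xor_comm vb vc]

theorem pvNatBit1 (v k : Nat) : v &&& (1 <<< k) = if v / 2^k % 2 = 1 then 2^k else 0 := by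
  rw [Nat.shiftLeft_eq, one_mul, Nat.and_two_pow, Nat.testBit_eq_decide_div_mod_eq]
  rcases Nat.decEq (v / 2^k % 2) 1 with h | h <;> simp [h]

theorem pvNatBit3 (v k : Nat) : (v >>> k) &&& 1 = v / 2^k % 2 := by
  rw [Nat.and_one_is_mod, Nat.shiftRight_eq_div_pow]

theorem pvBandNegSuccPow (v k : Nat) : PySem.Int.band (Int.negSucc v) ((1:Int) <<< k) = (((1 <<< k : Nat) - ((1 <<< k : Nat) &&& v) : Nat) : Int) := by
  show PySem.Int.band (Int.negSucc v) ((1 <<< k : Nat) : Int) = _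
  rw [PySem.Int.band]
  rw [if_neg (Int.not_le.mpr (Int.negSucc_lt_zero _)), if_pos (by positivity)]
  rw [show (-(Int.negSucc v) - 1) = ((v:Nat):Int) by rw [Int.negSucc_eq]; ring]
  rw [Int.toNat_natCast, Int.toNat_natCast]

theorem pvBandNegSuccOne (v k : Nat) : PySem.Int.band ((Int.negSucc v) >>> k) 1 = ((1 - (1 &&& (v >>> k)) : Nat) : Int) := by
  show PySem.Int.band (Int.negSucc (v >>> k)) 1 = _
  rw [PySem.Int.band]
  rw [if_neg (Int.not_le.mpr (Int.negSucc_lt_zero _)), if_pos (by norm_num)]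
  rw [show (-(Int.negSucc (v >>> k)) - 1) = ((v >>> k : Nat):Int) by rw [Int.negSucc_eq]; ring]
  rw [Int.toNat_natCast, Int.toNat_one]

-- A tests bit k by mask (x & (1 << k)), B by shift (x >> k & 1): the same condition.
theorem pvBitTest (a : Int) (k : Nat) :
    (PySem.Int.band a ((1 : Int) <<< k) ≠ 0) ↔ (PySem.Int.band (a >>> k) 1 ≠ 0) := by
  have hp : (0:Nat) < 2^k := by positivity
  cases a with
  | ofNat v =>
    rw [show ((1:Int) <<< k) = ((1 <<< k : Nat) : Int) from rfl,
        show (Int.ofNat v) = ((v:Nat):Int) from rfl,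
        show ((v:Nat):Int) >>> k = ((v >>> k : Nat) : Int) from rfl,
        show (1:Int) = ((1:Nat):Int) from rfl,
        PySem.Int.band_natCast, PySem.Int.band_natCast, pvNatBit1, pvNatBit3]
    rcases Nat.mod_two_eq_zero_or_one (v / 2^k) with h | h
    · simp [h]
    · simp [h]
  | negSucc v =>
    rw [pvBandNegSuccPow, pvBandNegSuccOne, Nat.land_comm, pvNatBit1, Nat.land_comm, pvNatBit3]
    rw [Nat.shiftLeft_eq, one_mul]
    rcases Nat.mod_two_eq_zero_or_one (v / 2^k) with h | h
    · simp [h]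
    · simp [h]

-- the countdown index list [N-1, ..., 0] that A iterates over
def pvDown : Nat → List Int
  | 0 => []
  | n + 1 => ((n : Nat) : Int) :: pvDown n

theorem pvRange_eq_down (N : Nat) : PySem.List.pyRange ((N : Int) - 1) (-1) (-1) = pvDown N := by
  induction N with
  | zero => exact PySem.List.pyRange_neg_one_eq_nil (by norm_num)
  | succ n ih =>
    rw [show ((n + 1 : Nat) : Int) - 1 = (n : Int) by push_cast; ring]
    rw [PySem.List.pyRange_neg_one_cons (by omega), ih]
    rfl

-- loop fusion: A's forward fold over [N-1..0] equals B's recursion, up to the initial accumulators.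
theorem pvFold_eq_go (m c irp : Int) : ∀ (N : Nat) (t mul sqr : Int),
    (pvDown N).foldl
      (fun (st : Int × Int × Int) (i : Int) =>
        let t0 := st.1
        let t1 := if PySem.Int.band t0 1 ≠ 0 then PySem.Int.bxor t0 irp else t0
        let t := t1 >>> 1
        let mulv := if PySem.Int.band c ((1 : Int) <<< i.toNat) ≠ 0 then PySem.Int.bxor st.2.1 t else st.2.1
        let sqrv := if PySem.Int.band m ((1 : Int) <<< i.toNat) ≠ 0 then PySem.Int.bxor st.2.2 t else st.2.2
        (t, mulv, sqrv))
      (t, mul, sqr)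
    = (((pvDown N).foldl
          (fun (u : Int) (_ : Int) => if PySem.Int.band u 1 ≠ 0 then (PySem.Int.bxor u irp) >>> 1 else u >>> 1) t),
        PySem.Int.bxor mul (pvGo m c irp t N).2,
        PySem.Int.bxor sqr (pvGo m c irp t N).1) := by
  intro N
  induction N with
  | zero => intro t mul sqr; simp [pvDown, pvGo]
  | succ k ih =>
    intro t mul sqr
    have hstep : ((if PySem.Int.band t 1 ≠ 0 then PySem.Int.bxor t irp else t) >>> 1)
        = (if PySem.Int.band t 1 ≠ 0 then (PySem.Int.bxor t irp) >>> 1 else t >>> 1) := by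
      split_ifs <;> rfl
    simp only [pvDown, List.foldl_cons, Int.toNat_natCast]
    rw [ih, hstep]
    simp only [pvGo]
    simp only [pvBitTest c k, pvBitTest m k]
    by_cases hc : PySem.Int.band (c >>> k) 1 ≠ 0 <;>
      by_cases hm : PySem.Int.band (m >>> k) 1 ≠ 0 <;>
        simp [hc, hm, pvBxor_left_comm]

-- ===== VERDICT (by name: the statement is the Claim_ definition above) =====
theorem mon_mult_and_square_spec : Claim_equal_mon_mult_and_square := by
  intro m c irp _
  show _ = _
  unfold mon_mult_and_square mon_mult_and_square_alt
  cases h : PySem.Int.bitLength irp with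
  | zero =>
    rw [show ((0 : Nat) : Int) - 2 = (-2 : Int) by norm_num]
    rw [PySem.List.pyRange_neg_one_eq_nil (by norm_num)]
    rfl
  | succ k =>
    rw [show ((k + 1 : Nat) : Int) - 2 = ((k : Nat) : Int) - 1 by push_cast; ring]
    rw [pvRange_eq_down k, pvFold_eq_go]
    rw [show k + 1 - 1 = k from rfl]
    rw [PySem.Int.bxor_comm 0 _, PySem.Int.bxor_zero, PySem.Int.bxor_comm 0 _, PySem.Int.bxor_zero]
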